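-- pv_equiv track=rewrite | github.com/PinKing141/Project-Moonlight-Engine | src/rpg/application/services/balance_tables.py | multiclass_caster_level
-- ===== SOURCE A (Python) =====
-- FULL_CASTER_CLASSES = {
--     "bard",
--     "cleric",
--     "druid",
--     "sorcerer",
--     "wizard",
-- }
--
-- HALF_CASTER_CLASSES = {
--     "paladin",
--     "ranger",
--     "artificer",
-- }
--
-- THIRD_CASTER_CLASSES = {
--     "arcane_trickster",
--     "eldritch_knight",
-- }
--
-- def multiclass_caster_level(class_levels: dict[str, int] | None) -> int:
--     if not isinstance(class_levels, dict):
--         return 0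
--     total = 0
--     for raw_slug, raw_level in class_levels.items():
--         slug = str(raw_slug or "").strip().lower()
--         try:
--             class_level = max(0, int(raw_level or 0))
--         except Exception:
--             class_level = 0
--         if class_level <= 0:
--             continue
--         if slug in FULL_CASTER_CLASSES:
--             total += class_level
--         elif slug in HALF_CASTER_CLASSES:
--             total += class_level // 2
--         elif slug in THIRD_CASTER_CLASSES:
--             total += class_level // 3
--     return max(0, min(20, int(total)))
-- ===== SOURCE B (Python) =====
-- FULL_CASTER_CLASSES = {"bard", "cleric", "druid", "sorcerer", "wizard"}
-- HALF_CASTER_CLASSES = {"paladin", "ranger", "artificer"}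
-- THIRD_CASTER_CLASSES = {"arcane_trickster", "eldritch_knight"}
--
-- def multiclass_caster_level(class_levels):
--     if not isinstance(class_levels, dict):
--         return 0
--     levels = []
--     for raw_slug, raw_level in class_levels.items():
--         slug = str(raw_slug or "").strip().lower()
--         try:
--             lvl = max(0, int(raw_level or 0))
--         except Exception:
--             lvl = 0
--         levels.append((slug, lvl))
--     full = sum(lvl for slug, lvl in levels if slug in FULL_CASTER_CLASSES)
--     half = sum(lvl // 2 for slug, lvl in levels if slug in HALF_CASTER_CLASSES)
--     third = sum(lvl // 3 for slug, lvl in levels if slug in THIRD_CASTER_CLASSES)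
--     return max(0, min(20, full + half + third))
-- ===== Notes on version B (the rewrite author's own statement) =====
-- stated objective: alternative
-- what changed: Instead of one loop with a three-way elif accumulator, B first normalizes every entry to a (slug, clamped level) pair, then computes the total as three separate comprehension sums over that list (full, half and third tiers) and clamps their sum; the explicit level<=0 skip disappears because a zero level contributes zero to every tier sum.
import Mathlib
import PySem

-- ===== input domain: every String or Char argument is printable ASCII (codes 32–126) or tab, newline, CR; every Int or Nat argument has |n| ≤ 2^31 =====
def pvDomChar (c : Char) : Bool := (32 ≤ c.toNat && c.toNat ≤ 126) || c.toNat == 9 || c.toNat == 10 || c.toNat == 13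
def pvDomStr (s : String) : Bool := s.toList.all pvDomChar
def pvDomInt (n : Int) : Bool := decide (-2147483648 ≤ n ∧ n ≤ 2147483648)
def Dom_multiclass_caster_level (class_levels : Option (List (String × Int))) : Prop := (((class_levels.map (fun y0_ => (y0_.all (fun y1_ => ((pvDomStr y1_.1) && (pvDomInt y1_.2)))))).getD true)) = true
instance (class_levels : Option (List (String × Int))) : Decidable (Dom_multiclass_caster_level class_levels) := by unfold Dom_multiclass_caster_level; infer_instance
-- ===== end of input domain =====

-- B replaces A's single loop with its three-way elif accumulator by a normalize-once pass
-- followed by three separate tier sums (objective: alternative, same cost).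

-- ===== PORT A =====
def FULL_CASTER_CLASSES : List String := ["bard", "cleric", "druid", "sorcerer", "wizard"]
def HALF_CASTER_CLASSES : List String := ["paladin", "ranger", "artificer"]
def THIRD_CASTER_CLASSES : List String := ["arcane_trickster", "eldritch_knight"]

def mclStepA (total : Int) (item : String × Int) : Int :=
  let slug := PySem.Str.lower (PySem.Str.strip item.1)
  let class_level : Int := max 0 item.2
  if class_level ≤ 0 then total
  else if slug ∈ FULL_CASTER_CLASSES then total + class_level
  else if slug ∈ HALF_CASTER_CLASSES then total + PySem.Int.floordiv class_level 2
  else if slug ∈ THIRD_CASTER_CLASSES then total + PySem.Int.floordiv class_level 3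
  else total

def multiclass_caster_level (class_levels : Option (List (String × Int))) : Int :=
  match class_levels with
  | none => 0
  | some items =>
    let total := items.foldl mclStepA 0
    max 0 (min 20 total)

-- ===== PORT B =====
def mclNorm (item : String × Int) : String × Int :=
  (PySem.Str.lower (PySem.Str.strip item.1), max 0 item.2)

def multiclass_caster_level_alt (class_levels : Option (List (String × Int))) : Int :=
  match class_levels with
  | none => 0
  | some items =>
    let levels := items.map mclNorm
    let full := ((levels.filter (fun p => decide (p.1 ∈ FULL_CASTER_CLASSES))).map (fun p => p.2)).sum
    let half := ((levels.filter (fun p => decide (p.1 ∈ HALF_CASTER_CLASSES))).map (fun p => PySem.Int.floordiv p.2 2)).sum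
    let third := ((levels.filter (fun p => decide (p.1 ∈ THIRD_CASTER_CLASSES))).map (fun p => PySem.Int.floordiv p.2 3)).sum
    max 0 (min 20 (full + half + third))

-- ===== PRECONDITION & SPEC =====
def Spec_multiclass_caster_level (class_levels : Option (List (String × Int))) (out : Int) : Prop := out = multiclass_caster_level_alt class_levels
instance (class_levels : Option (List (String × Int))) (out : Int) : Decidable (Spec_multiclass_caster_level class_levels out) := by unfold Spec_multiclass_caster_level; infer_instance

-- ===== CLAIM (what is proved, stated in full; the proofs are below) =====
def Claim_equal_multiclass_caster_level : Prop := ∀ (class_levels : Option (List (String × Int))), Dom_multiclass_caster_level class_levels → Spec_multiclass_caster_level class_levels (multiclass_caster_level class_levels)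

-- ===== LEMMAS AND PROOFS =====

def mclB_total (items : List (String × Int)) : Int :=
  let levels := items.map mclNorm
  ((levels.filter (fun p => decide (p.1 ∈ FULL_CASTER_CLASSES))).map (fun p => p.2)).sum
  + ((levels.filter (fun p => decide (p.1 ∈ HALF_CASTER_CLASSES))).map (fun p => PySem.Int.floordiv p.2 2)).sum
  + ((levels.filter (fun p => decide (p.1 ∈ THIRD_CASTER_CLASSES))).map (fun p => PySem.Int.floordiv p.2 3)).sum

theorem disj_FH (s : String) (h : s ∈ FULL_CASTER_CLASSES) : s ∉ HALF_CASTER_CLASSES := by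
  simp only [FULL_CASTER_CLASSES, List.mem_cons, List.not_mem_nil, or_false] at h
  rcases h with rfl | rfl | rfl | rfl | rfl <;> decide

theorem disj_FT (s : String) (h : s ∈ FULL_CASTER_CLASSES) : s ∉ THIRD_CASTER_CLASSES := by
  simp only [FULL_CASTER_CLASSES, List.mem_cons, List.not_mem_nil, or_false] at h
  rcases h with rfl | rfl | rfl | rfl | rfl <;> decide

theorem disj_HT (s : String) (h : s ∈ HALF_CASTER_CLASSES) : s ∉ THIRD_CASTER_CLASSES := by
  simp only [HALF_CASTER_CLASSES, List.mem_cons, List.not_mem_nil, or_false] at h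
  rcases h with rfl | rfl | rfl <;> decide

theorem mclB_total_cons (x : String × Int) (xs : List (String × Int)) :
    mclB_total (x :: xs) = mclStepA 0 x + mclB_total xs := by
  unfold mclB_total mclStepA
  simp only [List.map_cons, List.filter_cons]
  set slug := PySem.Str.lower (PySem.Str.strip x.1) with hslug
  have hnorm : mclNorm x = (slug, max 0 x.2) := rfl
  rw [hnorm]
  by_cases h0 : (max 0 x.2 : Int) ≤ 0
  · have hz : (max 0 x.2 : Int) = 0 := le_antisymm h0 (le_max_left 0 x.2)
    simp only [hz, le_refl, if_true]
    split_ifs <;> simp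
  · simp only [h0, if_false]
    by_cases hF : slug ∈ FULL_CASTER_CLASSES
    · simp [hF, disj_FH slug hF, disj_FT slug hF]; ring
    · by_cases hH : slug ∈ HALF_CASTER_CLASSES
      · simp [hF, hH, disj_HT slug hH]; ring
      · by_cases hT : slug ∈ THIRD_CASTER_CLASSES
        · simp [hF, hH, hT]; ring
        · simp [hF, hH, hT]

theorem mclStepA_shift (t : Int) (x : String × Int) : mclStepA t x = t + mclStepA 0 x := by
  unfold mclStepA
  dsimp only
  split_ifs <;> ring

theorem foldA_eq_totalB (items : List (String × Int)) :
    ∀ t : Int, items.foldl mclStepA t = t + mclB_total items := by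
  induction items with
  | nil =>
    intro t
    simp [mclB_total]
  | cons x xs ih =>
    intro t
    rw [List.foldl_cons, ih, mclB_total_cons, mclStepA_shift]
    ring

-- ===== VERDICT (by name: the statement is the Claim_ definition above) =====
theorem multiclass_caster_level_spec : Claim_equal_multiclass_caster_level := by
  intro cl _
  unfold Spec_multiclass_caster_level multiclass_caster_level multiclass_caster_level_alt
  cases cl with
  | none => rfl
  | some items =>
    show max 0 (min 20 (items.foldl mclStepA 0)) = _
    rw [foldA_eq_totalB items 0, zero_add]
    rfl
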